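-- pv_equiv track=rewrite | github.com/mbalzert1978/mp3tager | src/mp3tagv2.py | _sanatize
-- ===== SOURCE A (Python) =====
-- import string
--
-- def _sanatize(value: str) -> str:
--     return "".join(
--         letter
--         for letter in value
--         if letter
--         in (
--             letter
--             for letter in (
--                 string.ascii_lowercase
--                 + string.ascii_uppercase
--                 + string.digits
--                 + " "
--                 + "-"
--             )
--         )
--     ).strip()
-- ===== SOURCE B (Python) =====
-- def _sanatize(value: str) -> str:
--     # One pass: keep allowed chars, drop leading spaces as we go, and remember
--     # the length of the output up to the last non-space char (so no .strip()).
--     out = []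
--     last = 0
--     for c in value:
--         if c == ' ':
--             if out:
--                 out.append(c)
--         elif 'a' <= c <= 'z' or 'A' <= c <= 'Z' or '0' <= c <= '9' or c == '-':
--             out.append(c)
--             last = len(out)
--     return ''.join(out[:last])
-- ===== Notes on version B (the rewrite author's own statement) =====
-- stated objective: faster
-- what changed: A filters via membership in a freshly built 64-char generator per input char and then calls .strip(); B makes a single pass with O(1) range comparisons, dropping leading spaces on the fly and tracking the last non-space output index, so no strip pass at all.
import Mathlib
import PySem

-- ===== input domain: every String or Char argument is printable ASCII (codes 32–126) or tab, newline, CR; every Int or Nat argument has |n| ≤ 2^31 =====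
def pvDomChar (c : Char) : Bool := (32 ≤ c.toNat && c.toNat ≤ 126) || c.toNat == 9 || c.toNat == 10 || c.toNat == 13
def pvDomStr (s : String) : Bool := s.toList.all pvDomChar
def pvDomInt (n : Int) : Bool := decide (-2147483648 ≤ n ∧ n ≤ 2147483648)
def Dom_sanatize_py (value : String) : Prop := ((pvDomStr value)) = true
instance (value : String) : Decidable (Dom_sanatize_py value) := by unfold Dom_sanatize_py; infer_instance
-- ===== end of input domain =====

-- B replaces A's per-char scan of a freshly built 64-char alphabet plus .strip() by a single
-- pass with range comparisons that drops leading spaces on the fly and remembers the last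
-- non-space output index (measured faster by a constant factor).

-- ===== PORT A =====
-- the concatenated alphabet string A builds: lowercase + uppercase + digits + " " + "-"
def allowedA : List Char :=
  "abcdefghijklmnopqrstuvwxyzABCDEFGHIJKLMNOPQRSTUVWXYZ0123456789 -".toList

def sanatize_py (value : String) : String :=
  PySem.Str.strip (String.ofList (value.toList.filter (fun c => allowedA.contains c)))

-- ===== PORT B =====
def keepB (c : Char) : Bool :=
  (decide ('a' ≤ c) && decide (c ≤ 'z')) || (decide ('A' ≤ c) && decide (c ≤ 'Z')) ||
  (decide ('0' ≤ c) && decide (c ≤ '9')) || c == '-'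

def bStep (st : List Char × Nat) (c : Char) : List Char × Nat :=
  if c == ' ' then (if st.1.isEmpty then st else (st.1 ++ [c], st.2))
  else if keepB c then (st.1 ++ [c], st.1.length + 1)
  else st

def sanatize_py_alt (value : String) : String :=
  let st := value.toList.foldl bStep ([], 0)
  String.ofList (st.1.take st.2)

-- ===== PRECONDITION & SPEC =====
def Spec_sanatize_py (value : String) (out : String) : Prop := out = sanatize_py_alt value
instance (value : String) (out : String) : Decidable (Spec_sanatize_py value out) := by unfold Spec_sanatize_py; infer_instance

-- ===== CLAIM (what is proved, stated in full; the proofs are below) =====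
def Claim_equal_sanatize_py : Prop := ∀ (value : String), Dom_sanatize_py value → Spec_sanatize_py value (sanatize_py value)

-- ===== LEMMAS AND PROOFS =====
def keepAll (c : Char) : Bool := keepB c || c == ' '
def dropSpaces (xs : List Char) : List Char := xs.dropWhile (fun c => c == ' ')
def rtrimS (xs : List Char) : List Char := (xs.reverse.dropWhile (fun c => c == ' ')).reverse

theorem charEq_iff_toNat (c d : Char) : c = d ↔ c.toNat = d.toNat :=
  ⟨fun h => h ▸ rfl, fun h => Char.ext (UInt32.toNat_inj.mp h)⟩

theorem contains_eq_keepAll (c : Char) : allowedA.contains c = keepAll c := by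
  have h : allowedA = ['a', 'b', 'c', 'd', 'e', 'f', 'g', 'h', 'i', 'j', 'k', 'l', 'm', 'n', 'o', 'p', 'q', 'r', 's', 't', 'u', 'v', 'w', 'x', 'y', 'z', 'A', 'B', 'C', 'D', 'E', 'F', 'G', 'H', 'I', 'J', 'K', 'L', 'M', 'N', 'O', 'P', 'Q', 'R', 'S', 'T', 'U', 'V', 'W', 'X', 'Y', 'Z', '0', '1', '2', '3', '4', '5', '6', '7', '8', '9', ' ', '-'] := by rfl
  rw [h, keepAll, keepB]
  simp only [List.contains_eq_mem]
  rw [Bool.eq_iff_iff]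
  simp [charEq_iff_toNat, Char.le_def, UInt32.le_iff_toNat_le]
  omega

theorem keepAll_not_space (c : Char) (hk : keepAll c = true) (hs : (c == ' ') = false) :
    keepB c = true := by
  rw [keepAll] at hk
  rcases Bool.or_eq_true_iff.mp hk with h | h
  · exact h
  · rw [hs] at h; cases h

theorem isspace_eq_space (c : Char) (h : keepAll c = true) :
    PySem.Chars.isspace c = (c == ' ') := by
  rw [keepAll, keepB] at h
  rw [Bool.eq_iff_iff, PySem.Chars.isspace]
  simp [charEq_iff_toNat, Char.le_def, UInt32.le_iff_toNat_le] at *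
  omega

theorem dropWhile_congr_mem {α : Type} (p q : α → Bool) (l : List α)
    (h : ∀ x ∈ l, p x = q x) : l.dropWhile p = l.dropWhile q := by
  induction l with
  | nil => rfl
  | cons a l ih =>
    simp only [List.dropWhile_cons]
    rw [h a (List.mem_cons_self), ih (fun x hx => h x (List.mem_cons_of_mem a hx))]

theorem rtrimS_append_space (xs : List Char) : rtrimS (xs ++ [' ']) = rtrimS xs := by
  simp [rtrimS]

theorem rtrimS_append_nonspace (xs : List Char) (c : Char) (h : (c == ' ') = false) :
    rtrimS (xs ++ [c]) = xs ++ [c] := by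
  simp [rtrimS, h]

theorem rtrimS_prefix (xs : List Char) : rtrimS xs <+: xs := by
  rw [rtrimS]
  simpa using (List.dropWhile_suffix (fun c => c == ' ') (l := xs.reverse)).reverse

-- main invariant: the fold computes (leading-space-free filtered list, its right-trimmed length)
theorem fold_invariant (l : List Char) :
    l.foldl bStep ([], 0) =
      (dropSpaces (l.filter keepAll), (rtrimS (dropSpaces (l.filter keepAll))).length) := by
  induction l using List.reverseRecOn with
  | nil => rfl
  | append_singleton l c ih =>
    rw [List.foldl_append, List.foldl_cons, List.foldl_nil, ih, List.filter_append]
    by_cases hk : keepAll c = true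
    · rw [List.filter_cons, if_pos hk, List.filter_nil]
      by_cases hs : (c == ' ') = true
      · have hc : c = ' ' := beq_iff_eq.mp hs
        subst hc
        rw [bStep]
        simp only [if_pos hs]
        by_cases he : (dropSpaces (l.filter keepAll)).isEmpty = true
        · rw [if_pos he]
          have hde : (l.filter keepAll).dropWhile (fun c => c == ' ') = [] := by
            simpa [dropSpaces] using he
          have h2 : dropSpaces (l.filter keepAll ++ [' ']) = [] := by
            simp [dropSpaces, List.dropWhile_append, hde]
          rw [h2]
          simp [dropSpaces, hde]
        · rw [if_neg he]
          have hne : (l.filter keepAll).dropWhile (fun c => c == ' ') ≠ [] := by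
            simpa [dropSpaces] using he
          have h2 : dropSpaces (l.filter keepAll ++ [' ']) = dropSpaces (l.filter keepAll) ++ [' '] := by
            simp [dropSpaces, List.dropWhile_append, hne]
          rw [h2, rtrimS_append_space]
      · have hs' : (c == ' ') = false := by simpa using hs
        have hkb : keepB c = true := keepAll_not_space c hk hs'
        have hdrop : dropSpaces (l.filter keepAll ++ [c]) = dropSpaces (l.filter keepAll) ++ [c] := by
          by_cases he : (l.filter keepAll).dropWhile (fun c => c == ' ') = []
          · simp [dropSpaces, List.dropWhile_append, he, hs']
          · simp [dropSpaces, List.dropWhile_append, he]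
        rw [hdrop, rtrimS_append_nonspace _ _ hs']
        simp [bStep, hs', hkb]
    · rw [List.filter_cons, if_neg hk, List.filter_nil, List.append_nil, bStep]
      have hs : (c == ' ') = false := by
        cases hcs : (c == ' ') with
        | false => rfl
        | true => exact absurd (by rw [keepAll]; simp [hcs]) hk
      have hkb : keepB c = false := by
        cases hcb : keepB c with
        | false => rfl
        | true => exact absurd (by rw [keepAll]; simp [hcb]) hk
      simp [hs, hkb]

theorem strip_eq_rtrim_drop (f : List Char) (h : ∀ x ∈ f, keepAll x = true) :
    PySem.Chars.strip f = rtrimS (dropSpaces f) := by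
  rw [PySem.Chars.strip, PySem.Chars.lstrip, PySem.Chars.rstrip, rtrimS, dropSpaces]
  rw [dropWhile_congr_mem _ (fun c => c == ' ') f (fun x hx => isspace_eq_space x (h x hx))]
  congr 1
  apply dropWhile_congr_mem
  intro x hx
  exact isspace_eq_space x
    (h x ((List.dropWhile_suffix _).subset (List.mem_reverse.mp hx)))

-- ===== VERDICT (by name: the statement is the Claim_ definition above) =====
theorem sanatize_py_spec : Claim_equal_sanatize_py := by
  intro value _
  unfold Spec_sanatize_py sanatize_py sanatize_py_alt
  rw [List.filter_congr (fun x _ => contains_eq_keepAll x)]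
  rw [fold_invariant]
  have hmem : ∀ x ∈ value.toList.filter keepAll, keepAll x = true :=
    fun x hx => List.of_mem_filter hx
  rw [PySem.Str.strip]
  have htl : (String.ofList (value.toList.filter keepAll)).toList = value.toList.filter keepAll := by
    simp
  rw [htl, strip_eq_rtrim_drop _ hmem]
  dsimp only
  have hpre := rtrimS_prefix (dropSpaces (value.toList.filter keepAll))
  rw [← List.prefix_iff_eq_take.mp hpre]
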